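-- pv_equiv track=rewrite | github.com/MoWitek/YOLO | tasks/task2/Aufgabe2cv.py | fuze_slopes
-- ===== SOURCE A (Python) =====
-- from typing import List, Tuple, Any
--
-- def create_slope(size, fill, back):
--     ar = []
--     for n in range(size):
--         a2 = []
--         a2.extend([fill for n in range(n + 1)])
--         a2.extend([back for n in range(size - n - 1)])
--         ar.append(a2)
--
--     return ar
--
-- def strech_array(arr, strech_factor: int):
--     mid = len(arr) // 2
--     new_arr = []
--
--     # if arr empty return
--     if not arr:
--         return arr
--
--     # strech left side of the center
--     for x in arr[:mid]:
--         for _ in range(strech_factor):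
--             new_arr.append(x.copy())
--
--     # copy center
--     new_arr.append(arr[mid].copy())
--
--     # strech right side of the center
--     for x in arr[mid + 1:]:
--         for _ in range(strech_factor):
--             new_arr.append(x.copy())
--
--     return new_arr
--
-- def rotate_array(array):
--     return [list(v) for v in list(zip(*array[::-1]))]
--
-- def fuze_slopes(s, fill: Any = 1, back: Any = 0, xmul: int = 1, ymul: int = 1):
--     # make slopes and oriante every in a diferent direction
--     a1 = create_slope(s, fill, back)
--     a2 = rotate_array(create_slope(s, fill, back))
--     a3 = rotate_array(rotate_array(create_slope(s, fill, back)))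
--     a4 = rotate_array(rotate_array(rotate_array(create_slope(s, fill, back))))
--
--     # FUZE
--     arr = []
--     for a, b in zip(a4, a1):
--         arr.append([])
--         arr[-1].extend(a)
--         arr[-1].extend(b[1:])
--     for c, d in zip(a3[1:], a2[1:]):
--         arr.append([])
--         arr[-1].extend(c)
--         arr[-1].extend(d[1:])
--
--     # adopt y growth multipliers
--     if ymul != 1:
--         arr = strech_array(arr, ymul)
--
--     # adopt x growth multipliers
--     if xmul != 1:
--         arr = rotate_array(arr)
--         arr = strech_array(arr, xmul)
--         arr = rotate_array(arr)
--
--     return arr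
-- ===== SOURCE B (Python) =====
-- def _rotate(arr):
--     m = min((len(r) for r in arr), default=0)
--     return [[row[i] for row in reversed(arr)] for i in range(m)]
--
-- def _stretch(arr, f):
--     if not arr:
--         return arr
--     mid = len(arr) // 2
--     return ([r.copy() for r in arr[:mid] for _ in range(f)]
--             + [arr[mid].copy()]
--             + [r.copy() for r in arr[mid + 1:] for _ in range(f)])
--
-- def fuze_slopes(s, fill=1, back=0, xmul=1, ymul=1):
--     if s <= 0:
--         return []
--     n = 2 * s - 1
--     c = s - 1
--     arr = [[fill if abs(i - c) + abs(j - c) <= c else back for j in range(n)]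
--            for i in range(n)]
--     if ymul != 1:
--         arr = _stretch(arr, ymul)
--     if xmul != 1:
--         arr = _rotate(_stretch(_rotate(arr), xmul))
--     return arr
-- ===== Notes on version B (the rewrite author's own statement) =====
-- stated objective: simpler
-- what changed: B builds the diamond grid directly with one comprehension over the |i-c|+|j-c|<=c predicate (no create_slope, no four zip-based rotations, no fuze loops), keeps the stretch/rotate multiplier tail with stretch written as slice concatenation and rotate as an index-based transpose.
import Mathlib
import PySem

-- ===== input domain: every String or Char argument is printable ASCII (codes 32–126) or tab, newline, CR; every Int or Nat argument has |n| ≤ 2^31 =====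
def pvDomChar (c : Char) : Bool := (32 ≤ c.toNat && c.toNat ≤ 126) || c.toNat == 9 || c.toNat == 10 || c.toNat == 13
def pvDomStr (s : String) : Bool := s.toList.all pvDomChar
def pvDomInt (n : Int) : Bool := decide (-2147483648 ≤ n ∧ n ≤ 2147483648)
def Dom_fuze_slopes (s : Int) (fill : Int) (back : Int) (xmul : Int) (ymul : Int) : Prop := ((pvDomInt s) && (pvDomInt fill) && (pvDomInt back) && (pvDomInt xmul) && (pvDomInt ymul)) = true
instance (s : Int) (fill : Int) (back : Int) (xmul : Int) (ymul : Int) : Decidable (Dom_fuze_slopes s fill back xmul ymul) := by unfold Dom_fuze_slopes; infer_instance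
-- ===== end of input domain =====

-- B replaces A's create_slope + four rotations + fuze loops by one direct diamond comprehension
-- (simpler, same cost); the multiplier tail keeps A's call pattern with differently written helpers.

-- ===== PORT A =====

-- hand port of the builtin zip(*rows): take heads while no row is exhausted (exact: zip stops at the shortest row)
def pvZipT (rows : List (List Int)) : List (List Int) :=
  if h : rows = [] ∨ rows.any (·.isEmpty) then []
  else (rows.map (fun r => r.headD 0)) :: pvZipT (rows.map List.tail)
termination_by ((rows.headD []).length)
decreasing_by
  push_neg at h
  obtain ⟨h1, h2⟩ := h
  cases rows with
  | nil => exact absurd rfl h1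
  | cons r rest =>
    simp only [List.map_cons, List.headD_cons]
    have : ¬ r.isEmpty := by
      intro hemp
      have := congrArg (List.any · (·.isEmpty)) (rfl : r :: rest = r :: rest)
      simp [List.any_cons, hemp] at h2
    have hr : r ≠ [] := by simpa [List.isEmpty_iff] using this
    have : 0 < r.length := List.length_pos_of_ne_nil hr
    simp [List.length_tail]
    omega

-- rotate_array(array) = [list(v) for v in zip(*array[::-1])]
def rotateA (a : List (List Int)) : List (List Int) := pvZipT a.reverse

-- create_slope
def createSlope (size fill back : Int) : List (List Int) :=
  (PySem.List.pyRange 0 size 1).foldl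
    (fun ar n =>
      ar ++ [((PySem.List.pyRange 0 (n + 1) 1).map fun _ => fill)
             ++ ((PySem.List.pyRange 0 (size - n - 1) 1).map fun _ => back)]) []

-- strech_array (the inner 'for _ in range(f): new_arr.append(x.copy())' is the inner foldl)
def strechArray (arr : List (List Int)) (f : Int) : List (List Int) :=
  let mid := arr.length / 2
  if arr = [] then arr
  else
    let n1 := (arr.take mid).foldl
      (fun na x => (PySem.List.pyRange 0 f 1).foldl (fun na2 _ => na2 ++ [x]) na) []
    let n2 := n1 ++ [arr.getD mid []]   -- arr[mid]: always in range here (arr ≠ [], mid < len)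
    (arr.drop (mid + 1)).foldl
      (fun na x => (PySem.List.pyRange 0 f 1).foldl (fun na2 _ => na2 ++ [x]) na) n2

def fuze_slopes (s : Int) (fill : Int) (back : Int) (xmul : Int) (ymul : Int) : List (List Int) :=
  let a1 := createSlope s fill back
  let a2 := rotateA (createSlope s fill back)
  let a3 := rotateA (rotateA (createSlope s fill back))
  let a4 := rotateA (rotateA (rotateA (createSlope s fill back)))
  let arr := (a4.zip a1).foldl (fun acc p => acc ++ [p.1 ++ p.2.drop 1]) []
  let arr := ((a3.drop 1).zip (a2.drop 1)).foldl (fun acc p => acc ++ [p.1 ++ p.2.drop 1]) arr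
  let arr := if ymul ≠ 1 then strechArray arr ymul else arr
  let arr := if xmul ≠ 1 then rotateA (strechArray (rotateA arr) xmul) else arr
  arr

-- ===== PORT B =====

-- _rotate: index-based transpose of the reversed rows, width = min row length (0 for [])
def rotateAlt (arr : List (List Int)) : List (List Int) :=
  let m := ((arr.map List.length).min?).getD 0
  (List.range m).map (fun i => arr.reverse.map (fun row => row.getD i 0))

-- _stretch: slice concatenation; range(f) repeats f.toNat times
def stretchAlt (arr : List (List Int)) (f : Int) : List (List Int) :=
  if arr = [] then arr
  else
    let mid := arr.length / 2
    (arr.take mid).flatMap (fun r => List.replicate f.toNat r)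
      ++ [arr.getD mid []]
      ++ (arr.drop (mid + 1)).flatMap (fun r => List.replicate f.toNat r)

def fuze_slopes_alt (s : Int) (fill : Int) (back : Int) (xmul : Int) (ymul : Int) : List (List Int) :=
  if s ≤ 0 then []
  else
    let n := 2 * s - 1
    let c := s - 1
    let arr := (PySem.List.pyRange 0 n 1).map (fun i =>
      (PySem.List.pyRange 0 n 1).map (fun j => if |i - c| + |j - c| ≤ c then fill else back))
    let arr := if ymul ≠ 1 then stretchAlt arr ymul else arr
    let arr := if xmul ≠ 1 then rotateAlt (stretchAlt (rotateAlt arr) xmul) else arr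
    arr

-- ===== PRECONDITION & SPEC =====
def Spec_fuze_slopes (s : Int) (fill : Int) (back : Int) (xmul : Int) (ymul : Int) (out : List (List Int)) : Prop := out = fuze_slopes_alt s fill back xmul ymul
instance (s : Int) (fill : Int) (back : Int) (xmul : Int) (ymul : Int) (out : List (List Int)) : Decidable (Spec_fuze_slopes s fill back xmul ymul out) := by unfold Spec_fuze_slopes; infer_instance

-- ===== CLAIM (what is proved, stated in full; the proofs are below) =====
def Claim_equal_fuze_slopes : Prop := ∀ (s : Int) (fill : Int) (back : Int) (xmul : Int) (ymul : Int), Dom_fuze_slopes s fill back xmul ymul → Spec_fuze_slopes s fill back xmul ymul (fuze_slopes s fill back xmul ymul)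

-- ===== LEMMAS AND PROOFS =====

-- an n×m grid given by an entry function
def pvGrid (n m : Nat) (g : Nat → Nat → Int) : List (List Int) :=
  (List.range n).map (fun i => (List.range m).map (g i))

lemma rotateAlt_def (arr : List (List Int)) :
    rotateAlt arr = (List.range (((arr.map List.length).min?).getD 0)).map
      (fun i => arr.reverse.map (fun row => row.getD i 0)) := rfl

lemma strechArray_def (arr : List (List Int)) (f : Int) :
    strechArray arr f = if arr = [] then arr else
      (arr.drop (arr.length / 2 + 1)).foldl
        (fun na x => (PySem.List.pyRange 0 f 1).foldl (fun na2 _ => na2 ++ [x]) na)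
        (((arr.take (arr.length / 2)).foldl
          (fun na x => (PySem.List.pyRange 0 f 1).foldl (fun na2 _ => na2 ++ [x]) na) [])
          ++ [arr.getD (arr.length / 2) []]) := rfl

lemma stretchAlt_def (arr : List (List Int)) (f : Int) :
    stretchAlt arr f = if arr = [] then arr else
      (arr.take (arr.length / 2)).flatMap (fun r => List.replicate f.toNat r)
        ++ [arr.getD (arr.length / 2) []]
        ++ (arr.drop (arr.length / 2 + 1)).flatMap (fun r => List.replicate f.toNat r) := rfl

lemma pvZipT_rect (m : Nat) : ∀ rows : List (List Int), (∀ r ∈ rows, r.length = m) →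
    pvZipT rows = if rows = [] then []
      else (List.range m).map (fun i => rows.map (fun r => r.getD i 0)) := by
  induction m with
  | zero =>
    intro rows h
    cases rows with
    | nil => rw [pvZipT]; simp
    | cons r rest =>
      have hr : r.isEmpty = true := by
        have := h r (by simp)
        simpa [List.isEmpty_iff, List.length_eq_zero_iff] using this
      rw [pvZipT]
      simp [hr]
  | succ m ih =>
    intro rows h
    cases rows with
    | nil => rw [pvZipT]; simp
    | cons r rest =>
      have hany : (r :: rest).any (·.isEmpty) = false := by
        rw [List.any_eq_false]
        intro x hx
        have hx' := h x hx
        simp only [List.isEmpty_iff]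
        intro he
        rw [he] at hx'
        simp at hx'
      rw [pvZipT, dif_neg (by simp [hany])]
      have htails : ∀ t ∈ (r :: rest).map List.tail, t.length = m := by
        intro t ht
        simp only [List.mem_map] at ht
        obtain ⟨x, hx, rfl⟩ := ht
        have := h x hx
        simp [List.length_tail, this]
      rw [ih _ htails, if_neg (by simp), if_neg (by simp)]
      rw [List.range_succ_eq_map]
      simp [List.map_map]
      constructor
      · cases r <;> rfl
      · intro a _; cases a <;> rfl

lemma min_len (m : Nat) (arr : List (List Int)) (h : ∀ r ∈ arr, r.length = m)
    (hne : arr ≠ []) : ((arr.map List.length).min?).getD 0 = m := by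
  cases arr with
  | nil => exact absurd rfl hne
  | cons r rest =>
    rw [List.map_cons, List.min?_cons']
    simp only [Option.getD_some]
    have hr : r.length = m := h r (by simp)
    rw [hr]
    have key : ∀ l : List Nat, (∀ y ∈ l, y = m) → l.foldl min m = m := by
      intro l
      induction l with
      | nil => simp
      | cons a t iht =>
        intro ha
        rw [List.foldl_cons, ha a (by simp), min_self]
        exact iht (fun y hy => ha y (by simp [hy]))
    exact key _ (by
      intro y hy
      simp only [List.mem_map] at hy
      obtain ⟨x, hx, rfl⟩ := hy
      exact h x (by simp [hx]))

lemma rotateAlt_rect (m : Nat) (arr : List (List Int)) (h : ∀ r ∈ arr, r.length = m) :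
    rotateAlt arr = if arr = [] then []
      else (List.range m).map (fun i => arr.reverse.map (fun r => r.getD i 0)) := by
  by_cases hne : arr = []
  · subst hne; rw [rotateAlt_def]; simp
  · rw [rotateAlt_def, min_len m arr h hne, if_neg hne]

lemma rotateA_eq_alt (m : Nat) (arr : List (List Int)) (h : ∀ r ∈ arr, r.length = m) :
    rotateA arr = rotateAlt arr := by
  show pvZipT arr.reverse = rotateAlt arr
  rw [pvZipT_rect m arr.reverse (by intro r hr; exact h r (List.mem_reverse.mp hr))]
  rw [rotateAlt_rect m arr h]
  by_cases hne : arr = []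
  · subst hne; simp
  · rw [if_neg (by simpa using hne), if_neg hne]

lemma grid_rect (n m : Nat) (g : Nat → Nat → Int) : ∀ r ∈ pvGrid n m g, r.length = m := by
  intro r hr
  simp only [pvGrid, List.mem_map] at hr
  obtain ⟨i, _, rfl⟩ := hr
  simp

lemma rotateAlt_grid (n m : Nat) (hn : 0 < n) (g : Nat → Nat → Int) :
    rotateAlt (pvGrid n m g) = pvGrid m n (fun i j => g (n - 1 - j) i) := by
  rw [rotateAlt_rect m _ (grid_rect n m g)]
  rw [if_neg (by
    intro hcon
    have := congrArg List.length hcon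
    simp [pvGrid] at this
    omega)]
  unfold pvGrid
  apply List.map_congr_left
  intro i hi
  rw [List.mem_range] at hi
  apply List.ext_getElem
  · simp
  · intro j hj hj2
    simp only [List.length_map, List.length_reverse, List.length_range] at hj
    rw [List.getElem_map, List.getElem_reverse]
    simp only [List.getElem_map, List.getElem_range, List.length_map, List.length_range]
    rw [List.getD_eq_getElem _ _ (by simp [hi])]
    simp

lemma rotateA_grid (n m : Nat) (hn : 0 < n) (g : Nat → Nat → Int) :
    rotateA (pvGrid n m g) = pvGrid m n (fun i j => g (n - 1 - j) i) := by
  rw [rotateA_eq_alt m _ (grid_rect n m g), rotateAlt_grid n m hn g]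

lemma createSlope_grid (s fill back : Int) (hs : 1 ≤ s) :
    createSlope s fill back = pvGrid s.toNat s.toNat (fun i j => if j ≤ i then fill else back) := by
  unfold createSlope
  rw [PySem.List.foldl_append_singleton_eq_map, PySem.List.pyRange_one]
  simp only [List.map_map, List.nil_append, sub_zero]
  unfold pvGrid
  apply List.map_congr_left
  intro k hk
  rw [List.mem_range] at hk
  simp only [Function.comp_apply, zero_add]
  rw [List.map_const', List.map_const', PySem.List.length_pyRange_one, PySem.List.length_pyRange_one]
  have h1 : (((k : Int) + 1) - 0).toNat = k + 1 := by omega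
  have h2 : ((s - (k : Int) - 1) - 0).toNat = s.toNat - k - 1 := by omega
  rw [h1, h2]
  apply List.ext_getElem
  · simp; omega
  · intro j hj hj2
    simp only [List.length_append, List.length_replicate] at hj
    by_cases hjk : j < k + 1
    · rw [List.getElem_append_left (by simpa using hjk)]
      simp only [List.getElem_replicate, List.getElem_map, List.getElem_range]
      rw [if_pos (by omega)]
    · rw [List.getElem_append_right (by simpa using hjk)]
      simp only [List.getElem_replicate, List.getElem_map, List.getElem_range]
      rw [if_neg (by omega)]

lemma rep_loop {α β : Type} (l : List α) (x : β) : ∀ na : List β,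
    l.foldl (fun a _ => a ++ [x]) na = na ++ List.replicate l.length x := by
  induction l with
  | nil => intro na; simp
  | cons a t iht =>
    intro na
    rw [List.foldl_cons, iht]
    simp only [List.length_cons, List.replicate_succ, List.append_assoc, List.singleton_append]

lemma stretch_eq (arr : List (List Int)) (f : Int) : strechArray arr f = stretchAlt arr f := by
  rw [strechArray_def, stretchAlt_def]
  by_cases h : arr = []
  · simp [h]
  · rw [if_neg h, if_neg h]
    have hloop : ∀ (L : List (List Int)) (init : List (List Int)),
        L.foldl (fun na x => (PySem.List.pyRange 0 f 1).foldl (fun na2 _ => na2 ++ [x]) na) init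
          = init ++ L.flatMap (fun r => List.replicate f.toNat r) := by
      intro L
      induction L with
      | nil => intro init; simp
      | cons a t iht =>
        intro init
        rw [List.foldl_cons, rep_loop, iht, PySem.List.length_pyRange_one]
        simp [List.flatMap_cons, List.append_assoc]
    rw [hloop, hloop]
    simp [List.append_assoc]

lemma stretchAlt_rect (m : Nat) (arr : List (List Int)) (f : Int) (h : ∀ r ∈ arr, r.length = m) :
    ∀ r ∈ stretchAlt arr f, r.length = m := by
  intro r hr
  rw [stretchAlt_def] at hr
  by_cases hne : arr = []
  · rw [if_pos hne] at hr
    rw [hne] at hr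
    simp at hr
  · rw [if_neg hne] at hr
    simp only [List.append_assoc, List.mem_append, List.mem_flatMap, List.mem_singleton,
      List.mem_replicate] at hr
    rcases hr with ⟨x, hx, hrep⟩ | hc | ⟨x, hx, hrep⟩
    · rw [hrep.2]; exact h x (List.mem_of_mem_take hx)
    · rw [hc]
      have hmid : arr.length / 2 < arr.length :=
        Nat.div_lt_self (List.length_pos_of_ne_nil hne) (by norm_num)
      rw [List.getD_eq_getElem _ _ hmid]
      exact h _ (List.getElem_mem hmid)
    · rw [hrep.2]; exact h x (List.mem_of_mem_drop hx)

lemma rotateAlt_rect_rows (arr : List (List Int)) : ∀ r ∈ rotateAlt arr, r.length = arr.length := by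
  intro r hr
  rw [rotateAlt_def] at hr
  simp only [List.mem_map] at hr
  obtain ⟨i, _, rfl⟩ := hr
  simp

-- the fuzed diamond entry function
def pvDia (t : Nat) (fill back : Int) (i j : Nat) : Int :=
  if (if i ≤ t - 1 then t - 1 - i else i - (t - 1)) + (if j ≤ t - 1 then t - 1 - j else j - (t - 1)) ≤ t - 1
  then fill else back

lemma drop_one_grid (u : Nat) (G : Nat → Nat → Int) :
    ((List.range (u + 1)).map (fun i => (List.range (u + 1)).map (G i))).drop 1
      = (List.range u).map (fun k => (List.range (u + 1)).map (G (k + 1))) := by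
  rw [List.range_succ_eq_map]
  simp [List.map_map, Nat.succ_eq_add_one]

lemma drop_one_row (u : Nat) (g : Nat → Int) :
    ((List.range (u + 1)).map g).drop 1 = (List.range u).map (fun j => g (j + 1)) := by
  rw [List.range_succ_eq_map]
  simp [List.map_map, Nat.succ_eq_add_one]

lemma fuzeA_grid (s fill back : Int) (hs : 1 ≤ s) :
    (((rotateA (rotateA (createSlope s fill back))).drop 1).zip ((rotateA (createSlope s fill back)).drop 1)).foldl
        (fun acc p => acc ++ [p.1 ++ p.2.drop 1])
        (((rotateA (rotateA (rotateA (createSlope s fill back)))).zip (createSlope s fill back)).foldl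
          (fun acc p => acc ++ [p.1 ++ p.2.drop 1]) [])
    = pvGrid (2 * s.toNat - 1) (2 * s.toNat - 1) (pvDia s.toNat fill back) := by
  obtain ⟨u, hu⟩ : ∃ u, s.toNat = u + 1 := ⟨s.toNat - 1, by omega⟩
  rw [createSlope_grid s fill back hs, hu]
  rw [rotateA_grid (u + 1) (u + 1) (Nat.succ_pos u)]
  rw [rotateA_grid (u + 1) (u + 1) (Nat.succ_pos u)]
  rw [rotateA_grid (u + 1) (u + 1) (Nat.succ_pos u)]
  simp only [Nat.add_sub_cancel]
  rw [PySem.List.foldl_append_singleton_eq_map, PySem.List.foldl_append_singleton_eq_map]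
  simp only [List.nil_append, pvGrid]
  rw [drop_one_grid, drop_one_grid, List.zip_map', List.zip_map']
  simp only [List.map_map, Function.comp_def]
  have hN : 2 * (u + 1) - 1 = (u + 1) + u := by omega
  rw [hN]
  apply List.ext_getElem
  · simp
  · intro i hi hi2
    simp only [List.length_append, List.length_map, List.length_range] at hi
    by_cases hiu : i < u + 1
    · rw [List.getElem_append_left (by simpa using hiu)]
      simp only [List.getElem_map, List.getElem_range]
      rw [drop_one_row]
      apply List.ext_getElem
      · simp only [List.length_append, List.length_map, List.length_range]; try omega
      · intro j hj hj2
        simp only [List.length_append, List.length_map, List.length_range] at hj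
        by_cases hju : j < u + 1
        · rw [List.getElem_append_left (by simpa using hju)]
          simp only [List.getElem_map, List.getElem_range, pvDia, Nat.add_sub_cancel]
          split_ifs <;> omega
        · rw [List.getElem_append_right (by simpa using hju)]
          simp only [List.getElem_map, List.getElem_range, List.length_map, List.length_range, pvDia, Nat.add_sub_cancel]
          split_ifs <;> omega
    · rw [List.getElem_append_right (by simpa using hiu)]
      simp only [List.getElem_map, List.getElem_range, List.length_map, List.length_range]
      rw [drop_one_row]
      apply List.ext_getElem
      · simp only [List.length_append, List.length_map, List.length_range]; try omega
      · intro j hj hj2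
        simp only [List.length_append, List.length_map, List.length_range] at hj
        by_cases hju : j < u + 1
        · rw [List.getElem_append_left (by simpa using hju)]
          simp only [List.getElem_map, List.getElem_range, pvDia, Nat.add_sub_cancel]
          split_ifs <;> omega
        · rw [List.getElem_append_right (by simpa using hju)]
          simp only [List.getElem_map, List.getElem_range, List.length_map, List.length_range, pvDia, Nat.add_sub_cancel]
          split_ifs <;> omega

lemma arrB_grid (s fill back : Int) (hs : 1 ≤ s) :
    ((PySem.List.pyRange 0 (2 * s - 1) 1).map (fun i =>
      (PySem.List.pyRange 0 (2 * s - 1) 1).map (fun j =>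
        if |i - (s - 1)| + |j - (s - 1)| ≤ s - 1 then fill else back)))
    = pvGrid (2 * s.toNat - 1) (2 * s.toNat - 1) (pvDia s.toNat fill back) := by
  rw [PySem.List.pyRange_one]
  simp only [sub_zero, zero_add, List.map_map, Function.comp_def]
  unfold pvGrid pvDia
  have ht : ((2 * s - 1).toNat) = 2 * s.toNat - 1 := by omega
  rw [ht]
  apply List.map_congr_left
  intro i hi
  rw [List.mem_range] at hi
  apply List.map_congr_left
  intro j hj
  rw [List.mem_range] at hj
  rcases abs_cases ((i : Int) - (s - 1)) with ⟨h1, h2⟩ | ⟨h1, h2⟩ <;>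
    rcases abs_cases ((j : Int) - (s - 1)) with ⟨h3, h4⟩ | ⟨h3, h4⟩ <;>
    rw [h1, h3] <;> split_ifs <;> omega

lemma fuze_neg (s fill back xmul ymul : Int) (hs : s ≤ 0) :
    fuze_slopes s fill back xmul ymul = [] := by
  have h1 : createSlope s fill back = [] := by
    unfold createSlope
    rw [PySem.List.pyRange_one_eq_nil (by omega)]
    rfl
  have h2 : rotateA [] = [] := by
    show pvZipT [] = []
    rw [pvZipT]
    simp
  have h3 : ∀ y, strechArray ([] : List (List Int)) y = [] := by
    intro y
    rw [strechArray_def]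
    simp
  have hA : fuze_slopes s fill back xmul ymul =
      (fun fz =>
        (fun ay => if xmul ≠ 1 then rotateA (strechArray (rotateA ay) xmul) else ay)
          (if ymul ≠ 1 then strechArray fz ymul else fz))
      ((((rotateA (rotateA (createSlope s fill back))).drop 1).zip ((rotateA (createSlope s fill back)).drop 1)).foldl
        (fun acc p => acc ++ [p.1 ++ p.2.drop 1])
        (((rotateA (rotateA (rotateA (createSlope s fill back)))).zip (createSlope s fill back)).foldl
          (fun acc p => acc ++ [p.1 ++ p.2.drop 1]) [])) := rfl
  rw [hA, h1, h2]
  simp [h2, h3]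

-- ===== VERDICT (by name: the statement is the Claim_ definition above) =====
theorem fuze_slopes_spec : Claim_equal_fuze_slopes := by
  intro s fill back xmul ymul _hdom
  unfold Spec_fuze_slopes
  by_cases hs : s ≤ 0
  · rw [fuze_neg s fill back xmul ymul hs]
    simp [fuze_slopes_alt, hs]
  · push_neg at hs
    have hs1 : 1 ≤ s := hs
    have hA : fuze_slopes s fill back xmul ymul =
        (fun fz =>
          (fun ay => if xmul ≠ 1 then rotateA (strechArray (rotateA ay) xmul) else ay)
            (if ymul ≠ 1 then strechArray fz ymul else fz))
        ((((rotateA (rotateA (createSlope s fill back))).drop 1).zip ((rotateA (createSlope s fill back)).drop 1)).foldl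
          (fun acc p => acc ++ [p.1 ++ p.2.drop 1])
          (((rotateA (rotateA (rotateA (createSlope s fill back)))).zip (createSlope s fill back)).foldl
            (fun acc p => acc ++ [p.1 ++ p.2.drop 1]) [])) := rfl
    have hB : fuze_slopes_alt s fill back xmul ymul =
        if s ≤ 0 then [] else
        (fun gb =>
          (fun ay => if xmul ≠ 1 then rotateAlt (stretchAlt (rotateAlt ay) xmul) else ay)
            (if ymul ≠ 1 then stretchAlt gb ymul else gb))
        ((PySem.List.pyRange 0 (2 * s - 1) 1).map (fun i =>
          (PySem.List.pyRange 0 (2 * s - 1) 1).map (fun j =>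
            if |i - (s - 1)| + |j - (s - 1)| ≤ s - 1 then fill else back))) := rfl
    rw [hA, hB, if_neg (show ¬ s ≤ 0 by omega)]
    rw [fuzeA_grid s fill back hs1, arrB_grid s fill back hs1]
    set N := 2 * s.toNat - 1 with hN
    set X := pvGrid N N (pvDia s.toNat fill back) with hX
    simp only []
    have hXr : ∀ r ∈ X, r.length = N := grid_rect N N _
    have hYr : ∀ r ∈ (if ymul ≠ 1 then stretchAlt X ymul else X), r.length = N := by
      split
      · exact stretchAlt_rect N X ymul hXr
      · exact hXr
    simp only [stretch_eq]
    set Y := if ymul ≠ 1 then stretchAlt X ymul else X with hY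
    rw [rotateA_eq_alt N Y hYr]
    rw [rotateA_eq_alt (Y.length) (stretchAlt (rotateAlt Y) xmul)
        (stretchAlt_rect (Y.length) (rotateAlt Y) xmul (rotateAlt_rect_rows Y))]
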